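-- pv_equiv track=rewrite | github.com/atpcurr/atpcurr | embed.py | collect_children
-- ===== SOURCE A (Python) =====
-- def leading_zeros(clause):
--     if len(clause) == 0:
--         return 0
--     elif clause[0] == 0:
--         return 1 + leading_zeros(clause[1:])
--     else:
--         return 0
--
-- def collect_children(clause, nodeid):
--     if len(clause) == 0:
--         return [], nodeid, []
--     children = []
--     zeros = leading_zeros(clause)
--     if zeros == 0:
--         return children, nodeid+1, clause[1:]
--
--     current_nodeid = nodeid+1
--     current_clause = clause[zeros+1:]
--     for i in range(zeros):
--         children.append((nodeid, i+1, current_nodeid))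
--         children_of_children, current_nodeid, current_clause = collect_children(current_clause, current_nodeid)
--         children += children_of_children
--     return children, current_nodeid, current_clause
-- ===== SOURCE B (Python) =====
-- def collect_children(clause, nodeid):
--     # Iterative parse with an explicit work stack of pending (parent, ordinal)
--     # child slots, a cursor into the original list, and a running node counter;
--     # no recursion and no intermediate slices (one final slice for the suffix).
--     n = len(clause)
--     if n == 0:
--         return [], nodeid, []
--     z = 0
--     while z < n and clause[z] == 0:
--         z += 1
--     pos = z + 1
--     nid = nodeid + 1
--     children = []
--     stack = [(nodeid, i) for i in range(z, 0, -1)]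
--     while stack:
--         parent, i = stack.pop()
--         children.append((parent, i, nid))
--         if pos < n:
--             z = 0
--             while pos + z < n and clause[pos + z] == 0:
--                 z += 1
--             my = nid
--             nid += 1
--             pos += z + 1
--             for j in range(z, 0, -1):
--                 stack.append((my, j))
--     return children, nid, clause[pos:]
-- ===== Notes on version B (the rewrite author's own statement) =====
-- stated objective: alternative
-- what changed: Replaces A's recursive parse over fresh list slices (clause[1:], clause[zeros+1:] at every call) by an iterative stack machine: an explicit work stack of pending (parent, ordinal) child slots, a cursor into the original list and a running node counter, with a single final slice for the suffix.
import Mathlib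
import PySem

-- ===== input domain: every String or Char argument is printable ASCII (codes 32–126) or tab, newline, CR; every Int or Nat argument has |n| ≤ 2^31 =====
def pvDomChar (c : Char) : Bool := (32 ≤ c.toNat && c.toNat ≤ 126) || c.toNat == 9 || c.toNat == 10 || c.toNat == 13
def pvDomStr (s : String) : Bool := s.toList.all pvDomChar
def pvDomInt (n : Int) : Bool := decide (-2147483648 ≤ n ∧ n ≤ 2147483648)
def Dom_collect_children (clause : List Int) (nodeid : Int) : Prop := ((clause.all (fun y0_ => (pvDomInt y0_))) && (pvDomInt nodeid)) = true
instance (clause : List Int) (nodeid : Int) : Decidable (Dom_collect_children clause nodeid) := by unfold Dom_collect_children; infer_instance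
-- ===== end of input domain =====

-- B replaces A's recursion on list slices by an iterative stack machine over the
-- original list with a cursor (alternative structure; one final slice for the suffix).

-- ===== PORT A =====
-- leading_zeros: A's recursive leading-zero count on the list
def leading_zeros : List Int → Int
  | [] => 0
  | x :: rest => if x = 0 then 1 + leading_zeros rest else 0

-- loop body of A's `for i in range(zeros)` (rec = the recursive call at fuel f)
def stepA (nid : Int) (rec : List Int → Int → (List (Int × Int × Int)) × Int × List Int)
    (st : (List (Int × Int × Int)) × Int × List Int) (i : Nat) :
    (List (Int × Int × Int)) × Int × List Int :=
  (st.1 ++ [(nid, (i : Int) + 1, st.2.1)] ++ (rec st.2.2 st.2.1).1,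
   (rec st.2.2 st.2.1).2.1, (rec st.2.2 st.2.1).2.2)

-- A's recursion, fueled (the Python recursion always terminates; fuel = len+1 suffices,
-- proved in the lemmas below).  Slices clause[1:] / clause[zeros+1:] with nonnegative
-- start are exactly List.drop.
def aRun : Nat → List Int → Int → (List (Int × Int × Int)) × Int × List Int
  | 0, _, nid => ([], nid, [])
  | f + 1, clause, nid =>
    if clause = [] then ([], nid, [])
    else if leading_zeros clause = 0 then ([], nid + 1, clause.drop 1)
    else
      (List.range (leading_zeros clause).toNat).foldl (stepA nid (aRun f))
        ([], nid + 1, clause.drop ((leading_zeros clause).toNat + 1))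

def collect_children (clause : List Int) (nodeid : Int) :
    (List (Int × Int × Int)) × Int × List Int :=
  aRun (clause.length + 1) clause nodeid

-- ===== PORT B =====
-- B's `while pos+z < n and clause[pos+z] == 0` zero counter (index always in range,
-- so getD is exact)
def zerosFrom (clause : List Int) (pos : Nat) : Nat :=
  if h : pos < clause.length then
    if clause.getD pos 1 = 0 then zerosFrom clause (pos + 1) + 1 else 0
  else 0
termination_by clause.length - pos

-- the counted zeros never run past the end of the list (machine's termination needs it)
lemma zerosFrom_le (clause : List Int) : ∀ pos, zerosFrom clause pos ≤ clause.length - pos := by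
  intro pos
  induction pos using zerosFrom.induct clause with
  | case1 pos h h0 ih => rw [zerosFrom, dif_pos h, if_pos h0]; omega
  | case2 pos h h0 => rw [zerosFrom, dif_pos h, if_neg h0]; omega
  | case3 pos h => rw [zerosFrom, dif_neg h]; omega

-- the (parent, ordinal) slots Python's `for j in range(z,0,-1): stack.append((my,j))`
-- pushes: slots 1..z end up on top of the stack in order (head of the list = top)
def slots (nid : Int) (z : Nat) : List (Int × Int) :=
  (List.range z).map (fun j => (nid, Int.ofNat j + 1))

-- B's `while stack:` loop: pop a pending (parent, ordinal) slot, emit its edge, and if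
-- tokens remain parse the node header, pushing its own child slots.
def machine (clause : List Int) :
    List (Int × Int) → List (Int × Int × Int) → Nat → Int →
      (List (Int × Int × Int)) × Nat × Int
  | [], ch, pos, nid => (ch, pos, nid)
  | (parent, i) :: rest, ch, pos, nid =>
    if h : pos < clause.length then
      machine clause (slots nid (zerosFrom clause pos) ++ rest)
        (ch ++ [(parent, i, nid)]) (pos + zerosFrom clause pos + 1) (nid + 1)
    else
      machine clause rest (ch ++ [(parent, i, nid)]) pos nid
termination_by stack _ pos _ => stack.length + 2 * (clause.length - pos)
decreasing_by
  · have := zerosFrom_le clause pos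
    simp only [slots, List.length_append, List.length_map, List.length_range,
      List.length_cons]
    omega
  · simp only [List.length_cons]; omega

-- clause[pos:] with nonnegative pos is exactly List.drop
def collect_children_alt (clause : List Int) (nodeid : Int) :
    (List (Int × Int × Int)) × Int × List Int :=
  if clause = [] then ([], nodeid, [])
  else
    ((machine clause (slots nodeid (zerosFrom clause 0)) [] (zerosFrom clause 0 + 1) (nodeid + 1)).1,
     (machine clause (slots nodeid (zerosFrom clause 0)) [] (zerosFrom clause 0 + 1) (nodeid + 1)).2.2,
     clause.drop (machine clause (slots nodeid (zerosFrom clause 0)) [] (zerosFrom clause 0 + 1) (nodeid + 1)).2.1)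

-- ===== PRECONDITION & SPEC =====
def Spec_collect_children (clause : List Int) (nodeid : Int) (out : (List (Int × Int × Int)) × Int × List Int) : Prop := out = collect_children_alt clause nodeid
instance (clause : List Int) (nodeid : Int) (out : (List (Int × Int × Int)) × Int × List Int) : Decidable (Spec_collect_children clause nodeid out) := by unfold Spec_collect_children; infer_instance

-- ===== CLAIM (what is proved, stated in full; the proofs are below) =====
def Claim_equal_collect_children : Prop := ∀ (clause : List Int) (nodeid : Int), Dom_collect_children clause nodeid → Spec_collect_children clause nodeid (collect_children clause nodeid)

-- ===== LEMMAS AND PROOFS =====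

-- proof-only recursive reference parse (one subtree from a cursor), fueled
def stepB (nid : Int) (rec : Nat → Int → (List (Int × Int × Int)) × Int × Nat)
    (st : (List (Int × Int × Int)) × Int × Nat) (i : Nat) :
    (List (Int × Int × Int)) × Int × Nat :=
  (st.1 ++ [(nid, (i : Int) + 1, st.2.1)] ++ (rec st.2.2 st.2.1).1,
   (rec st.2.2 st.2.1).2.1, (rec st.2.2 st.2.1).2.2)

def bParse : Nat → List Int → Nat → Int → (List (Int × Int × Int)) × Int × Nat
  | 0, _, pos, nid => ([], nid, pos)
  | f + 1, clause, pos, nid =>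
    if clause.length ≤ pos then ([], nid, pos)
    else if zerosFrom clause pos = 0 then ([], nid + 1, pos + 1)
    else
      (List.range (zerosFrom clause pos)).foldl (stepB nid (bParse f clause))
        ([], nid + 1, pos + zerosFrom clause pos + 1)

-- the reference zero counter equals A's leading_zeros on the corresponding suffix
lemma zerosFrom_spec (clause : List Int) :
    ∀ n pos, clause.length - pos = n →
      leading_zeros (clause.drop pos) = ((zerosFrom clause pos : Nat) : Int) := by
  intro n
  induction n with
  | zero =>
    intro pos h
    have hle : clause.length ≤ pos := by omega
    rw [List.drop_eq_nil_of_le hle, zerosFrom]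
    simp [leading_zeros, Nat.not_lt.mpr hle]
  | succ n ih =>
    intro pos h
    have hlt : pos < clause.length := by omega
    rw [List.drop_eq_getElem_cons hlt, zerosFrom]
    simp only [leading_zeros, dif_pos hlt, List.getD_eq_getElem _ _ hlt]
    by_cases h0 : clause[pos] = 0
    · rw [if_pos h0, if_pos h0, ih (pos + 1) (by omega)]
      push_cast; ring
    · rw [if_neg h0, if_neg h0]; simp

-- the fold of the reference loop body never moves the cursor backwards
lemma foldB_mono (f : Nat) (clause : List Int) (nid : Int)
    (hm : ∀ pos c, pos ≤ (bParse f clause pos c).2.2) :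
    ∀ (l : List Nat) (st : (List (Int × Int × Int)) × Int × Nat),
      st.2.2 ≤ (l.foldl (stepB nid (bParse f clause)) st).2.2 := by
  intro l
  induction l with
  | nil => intro st; exact le_refl _
  | cons i l ihl =>
    intro st
    refine le_trans ?_ (ihl _)
    exact hm st.2.2 st.2.1

lemma bParse_mono : ∀ (f : Nat) (clause : List Int) (pos : Nat) (nid : Int),
    pos ≤ (bParse f clause pos nid).2.2 := by
  intro f
  induction f with
  | zero => intro clause pos nid; simp [bParse]
  | succ f ih =>
    intro clause pos nid
    rw [bParse]
    by_cases h1 : clause.length ≤ pos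
    · rw [if_pos h1]
    · rw [if_neg h1]
      by_cases h2 : zerosFrom clause pos = 0
      · rw [if_pos h2]; simp
      · rw [if_neg h2]
        refine le_trans ?_ (foldB_mono f clause nid (fun p c => ih clause p c) _ _)
        simp; omega

-- loop correspondence: A's fold on dropped suffixes maps onto the reference fold on cursors
lemma fold_corr (f : Nat) (clause : List Int) (nid : Int)
    (ihm : ∀ pos nid, clause.length - pos < f →
      aRun f (clause.drop pos) nid =
        ((bParse f clause pos nid).1, (bParse f clause pos nid).2.1,
          clause.drop (bParse f clause pos nid).2.2)) :
    ∀ (l : List Nat) (ch : List (Int × Int × Int)) (c : Int) (p : Nat),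
      1 ≤ f → clause.length < f + p →
      l.foldl (stepA nid (aRun f)) (ch, c, clause.drop p) =
        ((l.foldl (stepB nid (bParse f clause)) (ch, c, p)).1,
         (l.foldl (stepB nid (bParse f clause)) (ch, c, p)).2.1,
         clause.drop (l.foldl (stepB nid (bParse f clause)) (ch, c, p)).2.2) := by
  intro l
  induction l with
  | nil => intro ch c p _ _; rfl
  | cons i l ihl =>
    intro ch c p hf hp
    have hA := ihm p c (by omega)
    have hmono : p ≤ (bParse f clause p c).2.2 := bParse_mono f clause p c
    have hstep : stepA nid (aRun f) (ch, c, clause.drop p) i =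
        (ch ++ [(nid, (i : Int) + 1, c)] ++ (bParse f clause p c).1,
         (bParse f clause p c).2.1, clause.drop (bParse f clause p c).2.2) := by
      simp [stepA, hA]
    have hstepB : stepB nid (bParse f clause) (ch, c, p) i =
        (ch ++ [(nid, (i : Int) + 1, c)] ++ (bParse f clause p c).1,
         (bParse f clause p c).2.1, (bParse f clause p c).2.2) := by
      simp [stepB]
    rw [List.foldl_cons, List.foldl_cons, hstep, hstepB]
    exact ihl _ _ _ hf (by omega)

-- A's recursion on a suffix = the reference cursor parse, with enough fuel
lemma main_corr : ∀ (f : Nat) (clause : List Int) (pos : Nat) (nid : Int),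
    clause.length - pos < f →
    aRun f (clause.drop pos) nid =
      ((bParse f clause pos nid).1, (bParse f clause pos nid).2.1,
        clause.drop (bParse f clause pos nid).2.2) := by
  intro f
  induction f with
  | zero => intro clause pos nid h; omega
  | succ f ih =>
    intro clause pos nid h
    by_cases hpos : clause.length ≤ pos
    · have hd : clause.drop pos = [] := List.drop_eq_nil_of_le hpos
      rw [bParse, if_pos hpos, hd]
      simp [aRun]
    · rw [Nat.not_le] at hpos
      have hne : clause.drop pos ≠ [] := by
        intro hc
        have := List.drop_eq_nil_iff.mp hc
        omega
      have hz := zerosFrom_spec clause (clause.length - pos) pos rfl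
      rw [aRun, if_neg hne, bParse, if_neg (Nat.not_le.mpr hpos)]
      by_cases hz0 : zerosFrom clause pos = 0
      · have hA0 : leading_zeros (clause.drop pos) = 0 := by rw [hz, hz0]; rfl
        rw [if_pos hz0, if_pos hA0, List.drop_drop]
      · have hA0 : leading_zeros (clause.drop pos) ≠ 0 := by rw [hz]; exact_mod_cast hz0
        rw [if_neg hz0, if_neg hA0]
        have htn : (leading_zeros (clause.drop pos)).toNat = zerosFrom clause pos := by
          rw [hz]; exact Int.toNat_natCast _
        rw [htn, List.drop_drop]
        have hf1 : 1 ≤ f := by omega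
        have hinit : pos + (zerosFrom clause pos + 1) = pos + zerosFrom clause pos + 1 := by omega
        rw [hinit]
        exact fold_corr f clause nid (fun p n hp => ih clause p n hp) _ [] (nid + 1)
          (pos + zerosFrom clause pos + 1) hf1 (by omega)

-- processing a block of child slots on the machine stack = the reference fold
lemma machine_fold (f : Nat) (clause : List Int) (nidP : Int)
    (hih : ∀ (pos : Nat) (nid : Int) (rest : List (Int × Int))
        (ch : List (Int × Int × Int)) (p i : Int), clause.length - pos < f →
      machine clause ((p, i) :: rest) ch pos nid =
        machine clause rest (ch ++ (p, i, nid) :: (bParse f clause pos nid).1)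
          (bParse f clause pos nid).2.2 (bParse f clause pos nid).2.1)
    (hf : 1 ≤ f) :
    ∀ (l : List Nat) (rest : List (Int × Int)) (ch0 : List (Int × Int × Int))
      (st : (List (Int × Int × Int)) × Int × Nat),
      clause.length < f + st.2.2 →
      machine clause ((l.map (fun j => (nidP, Int.ofNat j + 1))) ++ rest)
          (ch0 ++ st.1) st.2.2 st.2.1 =
        machine clause rest
          (ch0 ++ (l.foldl (stepB nidP (bParse f clause)) st).1)
          (l.foldl (stepB nidP (bParse f clause)) st).2.2
          (l.foldl (stepB nidP (bParse f clause)) st).2.1 := by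
  intro l
  induction l with
  | nil => intro rest ch0 st _; rfl
  | cons j l ihl =>
    intro rest ch0 st hb
    have hB := hih st.2.2 st.2.1 (l.map (fun j => (nidP, Int.ofNat j + 1)) ++ rest)
      (ch0 ++ st.1) nidP (Int.ofNat j + 1) (by omega)
    rw [List.map_cons, List.cons_append, hB]
    have hacc : (ch0 ++ st.1) ++ (nidP, Int.ofNat j + 1, st.2.1) ::
        (bParse f clause st.2.2 st.2.1).1 =
        ch0 ++ (stepB nidP (bParse f clause) st j).1 := by
      simp [stepB]
    rw [hacc]
    have hmono : st.2.2 ≤ (bParse f clause st.2.2 st.2.1).2.2 :=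
      bParse_mono f clause st.2.2 st.2.1
    have := ihl rest ch0 (stepB nidP (bParse f clause) st j)
      (by simp only [stepB]; omega)
    simpa [stepB] using this
  
-- popping one pending child slot = emit its edge, then the reference subtree parse
lemma machine_bParse : ∀ (f : Nat) (clause : List Int) (pos : Nat) (nid : Int)
    (rest : List (Int × Int)) (ch : List (Int × Int × Int)) (p i : Int),
    clause.length - pos < f →
    machine clause ((p, i) :: rest) ch pos nid =
      machine clause rest (ch ++ (p, i, nid) :: (bParse f clause pos nid).1)
        (bParse f clause pos nid).2.2 (bParse f clause pos nid).2.1 := by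
  intro f
  induction f with
  | zero => intro clause pos nid rest ch p i h; omega
  | succ f ih =>
    intro clause pos nid rest ch p i h
    rw [machine, bParse]
    by_cases hpos : pos < clause.length
    · rw [dif_pos hpos, if_neg (by omega)]
      by_cases hz0 : zerosFrom clause pos = 0
      · rw [if_pos hz0, hz0]
        simp [slots]
      · rw [if_neg hz0]
        have hz1 : 1 ≤ zerosFrom clause pos := by omega
        have hf1 : 1 ≤ f := by omega
        have := machine_fold f clause nid
          (fun pos nid rest ch p i hlt => ih clause pos nid rest ch p i hlt) hf1
          (List.range (zerosFrom clause pos)) rest (ch ++ [(p, i, nid)])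
          ([], nid + 1, pos + zerosFrom clause pos + 1)
          (by show clause.length < f + (pos + zerosFrom clause pos + 1); omega)
        simpa [slots] using this
    · rw [dif_neg hpos, if_pos (by omega)]

-- ===== VERDICT (by name: the statement is the Claim_ definition above) =====
theorem collect_children_spec : Claim_equal_collect_children := by
  intro clause nodeid _
  unfold Spec_collect_children collect_children collect_children_alt
  by_cases hnil : clause = []
  · subst hnil; simp [aRun]
  · rw [if_neg hnil]
    have hlen : 0 < clause.length := List.length_pos_iff.mpr hnil
    have hA := main_corr (clause.length + 1) clause 0 nodeid (by omega)
    simp only [List.drop_zero] at hA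
    rw [hA, bParse, if_neg (by omega)]
    by_cases hz0 : zerosFrom clause 0 = 0
    · rw [if_pos hz0]
      simp [hz0, slots, machine]
    · rw [if_neg hz0]
      have := machine_fold clause.length clause nodeid
        (fun pos nid rest ch p i hlt => machine_bParse clause.length clause pos nid rest ch p i hlt)
        hlen (List.range (zerosFrom clause 0)) [] []
        ([], nodeid + 1, 0 + zerosFrom clause 0 + 1)
        (by show clause.length < clause.length + (0 + zerosFrom clause 0 + 1); omega)
      simp only [List.nil_append, List.append_nil, Nat.zero_add] at this
      rw [show slots nodeid (zerosFrom clause 0) =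
            (List.range (zerosFrom clause 0)).map (fun j => (nodeid, Int.ofNat j + 1)) from rfl,
          this, machine]
      simp
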